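-- pv_equiv track=rewrite | github.com/chen-ky/ks-bin-fuzzer | src/backend/py3/code_generator.py | _transpile_local_ref
-- ===== SOURCE A (Python) =====
-- from typing import List, Any
--
-- def _transpile_local_ref(class_name: str, available_ref: List[str], static_ref: List[str], expression: str) -> str:
--     cleaned_expression = []
--     for value in expression.split():
--         instance = "self"
--         if value in static_ref:
--             instance = class_name
--         if value in available_ref:
--             cleaned_expression.append(f"{instance}.{value}")
--         else:
--             cleaned_expression.append(value)
--     return " ".join(cleaned_expression)
-- ===== SOURCE B (Python) =====
-- def _transpile_local_ref(class_name, available_ref, static_ref, expression):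
--     tokens = expression.split()
--     present = set(tokens)
--     statics = set(static_ref)
--     table = {}
--     for value in available_ref:
--         if value in present:
--             instance = class_name if value in statics else "self"
--             table[value] = f"{instance}.{value}"
--     return " ".join(table.get(token, token) for token in tokens)
-- ===== Notes on version B (the rewrite author's own statement) =====
-- stated objective: alternative
-- what changed: B precomputes a substitution dict in one pass over available_ref (restricted via sets to tokens actually present, with the static/self decision inside the table-building loop) and then maps table.get over the tokens, instead of A's per-token list-membership tests.
import Mathlib
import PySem

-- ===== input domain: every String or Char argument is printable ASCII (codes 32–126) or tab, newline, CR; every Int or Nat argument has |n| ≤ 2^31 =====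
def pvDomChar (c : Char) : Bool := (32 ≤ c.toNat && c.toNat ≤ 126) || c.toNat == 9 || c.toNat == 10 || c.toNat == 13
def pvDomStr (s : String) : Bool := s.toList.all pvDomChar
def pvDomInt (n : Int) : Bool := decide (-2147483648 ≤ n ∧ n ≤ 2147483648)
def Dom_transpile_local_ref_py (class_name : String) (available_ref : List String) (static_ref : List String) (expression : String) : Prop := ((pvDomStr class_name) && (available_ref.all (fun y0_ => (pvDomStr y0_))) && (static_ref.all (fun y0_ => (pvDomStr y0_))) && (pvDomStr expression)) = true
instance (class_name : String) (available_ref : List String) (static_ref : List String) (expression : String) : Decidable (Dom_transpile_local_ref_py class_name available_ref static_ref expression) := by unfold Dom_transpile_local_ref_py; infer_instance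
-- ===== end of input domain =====

-- B precomputes the whole substitution table over available_ref once, then maps lookups over the tokens (alternative decomposition, same cost class).


-- ===== PORT A =====
-- A: per token, decide instance prefix and membership, appending to an accumulator list.
def transpile_local_ref_py (class_name : String) (available_ref : List String) (static_ref : List String) (expression : String) : String :=
  let cleaned_expression : List String :=
    (PySem.Str.split₀ expression).foldl (fun acc value =>
      let instance_ := if value ∈ static_ref then class_name else "self"
      if value ∈ available_ref then acc ++ [instance_ ++ "." ++ value]
      else acc ++ [value]) []
  PySem.Str.join " " cleaned_expression

-- ===== PORT B =====
-- B: build the substitution table once over available_ref (restricted to present tokens), then map table.get.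
def transpile_local_ref_py_alt (class_name : String) (available_ref : List String) (static_ref : List String) (expression : String) : String :=
  let tokens := PySem.Str.split₀ expression
  let present : PySem.Set String := PySem.Set.ofList tokens
  let statics : PySem.Set String := PySem.Set.ofList static_ref
  let table : PySem.Dict String String :=
    available_ref.foldl (fun d value =>
      if value ∈ present then
        let instance_ := if value ∈ statics then class_name else "self"
        d.insert value (instance_ ++ "." ++ value)
      else d) PySem.Dict.empty
  PySem.Str.join " " (tokens.map (fun token => table.getD token token))

-- ===== PRECONDITION & SPEC =====
def Spec_transpile_local_ref_py (class_name : String) (available_ref : List String) (static_ref : List String) (expression : String) (out : String) : Prop := out = transpile_local_ref_py_alt class_name available_ref static_ref expression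
instance (class_name : String) (available_ref : List String) (static_ref : List String) (expression : String) (out : String) : Decidable (Spec_transpile_local_ref_py class_name available_ref static_ref expression out) := by unfold Spec_transpile_local_ref_py; infer_instance

-- ===== CLAIM (what is proved, stated in full; the proofs are below) =====
def Claim_equal_transpile_local_ref_py : Prop := ∀ (class_name : String) (available_ref : List String) (static_ref : List String) (expression : String), Dom_transpile_local_ref_py class_name available_ref static_ref expression → Spec_transpile_local_ref_py class_name available_ref static_ref expression (transpile_local_ref_py class_name available_ref static_ref expression)

-- ===== LEMMAS AND PROOFS =====

-- ===== VERDICT (by name: the statement is the Claim_ definition above) =====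
-- the built table looks up exactly A's per-token replacement (for tokens in `present`)
lemma table_getD (class_name : String) (static_ref present : List String)
    (l : List String) (d : PySem.Dict String String) (tok : String) :
    (l.foldl (fun d value =>
      if value ∈ present then
        d.insert value ((if value ∈ static_ref then class_name else "self") ++ "." ++ value)
      else d) d).getD tok tok
    = if tok ∈ l ∧ tok ∈ present then
        (if tok ∈ static_ref then class_name else "self") ++ "." ++ tok
      else d.getD tok tok := by
  induction l generalizing d with
  | nil => simp
  | cons v rest ih =>
    simp only [List.foldl_cons, List.mem_cons]
    by_cases hp : v ∈ present
    · simp only [hp, if_true, ih, PySem.Dict.getD_insert]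
      by_cases hr : tok ∈ rest <;> by_cases hv : tok = v <;>
        by_cases htp : tok ∈ present <;> simp_all
    · simp only [hp, if_false, ih]
      by_cases hr : tok ∈ rest <;> by_cases hv : tok = v <;>
        by_cases htp : tok ∈ present <;> simp_all

theorem transpile_local_ref_py_spec : Claim_equal_transpile_local_ref_py := by
  intro class_name available_ref static_ref expression _
  unfold Spec_transpile_local_ref_py transpile_local_ref_py transpile_local_ref_py_alt
  simp only [PySem.Set.mem_ofList]
  congr 1
  have h : ∀ (l : List String) (acc : List String),
      l.foldl (fun acc value =>
        let instance_ := if value ∈ static_ref then class_name else "self"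
        if value ∈ available_ref then acc ++ [instance_ ++ "." ++ value]
        else acc ++ [value]) acc
      = acc ++ l.map (fun tok =>
          if tok ∈ available_ref then (if tok ∈ static_ref then class_name else "self") ++ "." ++ tok
          else tok) := by
    intro l
    induction l with
    | nil => simp
    | cons v rest ih =>
      intro acc
      simp only [List.foldl_cons, List.map_cons, ih]
      by_cases hv : v ∈ available_ref <;> simp [hv]
  rw [h]
  simp only [List.nil_append]
  apply List.map_congr_left
  intro tok htok
  rw [table_getD]
  by_cases ha : tok ∈ available_ref <;> simp [ha, htok]
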